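-- pv_equiv track=rewrite | github.com/JohnIsak/students | Reinforcement Learning/Episode 6/Episode5.py | find_G
-- ===== SOURCE A (Python) =====
-- def find_G(tau, n, T, reward_memory):
--     G = 0
--     i = (tau+1)%(n+1)
--     while(True):
--         if i == T%(n+1):
--             break
--         G = G + reward_memory[i]
--         i = (i+1)%(n+1)
--     return G
-- ===== SOURCE B (Python) =====
-- def find_G(tau, n, T, reward_memory):
--     m = n + 1
--     start = (tau + 1) % m
--     stop = T % m
--     if start == stop:
--         return 0
--     if start < stop:
--         return sum(reward_memory[start:stop])
--     return sum(reward_memory[start:m]) + sum(reward_memory[0:stop])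
-- ===== Notes on version B (the rewrite author's own statement) =====
-- stated objective: simpler
-- what changed: replaces the per-element modular while-loop with an up-front computation of start/stop residues and at most two contiguous slice summations via built-in sum
-- outside the precondition, e.g. on find_G(0, -4, 0, [1, 2, 3]): A returns 5, B returns 0
import Mathlib
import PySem

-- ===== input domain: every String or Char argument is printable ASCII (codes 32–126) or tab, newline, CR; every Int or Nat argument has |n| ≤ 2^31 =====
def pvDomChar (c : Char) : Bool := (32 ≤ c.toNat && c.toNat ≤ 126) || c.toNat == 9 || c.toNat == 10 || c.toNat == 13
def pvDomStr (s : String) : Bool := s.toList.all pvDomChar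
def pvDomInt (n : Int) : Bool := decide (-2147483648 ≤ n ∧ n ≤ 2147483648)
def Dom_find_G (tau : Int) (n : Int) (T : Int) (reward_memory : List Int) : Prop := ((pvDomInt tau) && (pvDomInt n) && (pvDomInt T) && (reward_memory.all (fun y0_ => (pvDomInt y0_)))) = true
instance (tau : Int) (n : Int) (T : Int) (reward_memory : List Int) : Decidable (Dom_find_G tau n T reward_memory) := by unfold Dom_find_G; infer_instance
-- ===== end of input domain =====

-- B replaces A's per-element modular while-loop by computing the start/stop residues once and
-- summing at most two contiguous slices (objective: simpler).

-- ===== PORT A =====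
-- A's 'while True' loop; the fuel (n+1).toNat only makes the recursion total (the loop performs
-- fewer than n+1 iterations whenever it terminates, since i ranges over the residues mod n+1).
def find_G_loop (m t : Int) (rm : List Int) : Nat → Int → Int → Int
  | 0, _, G => G
  | fuel+1, i, G =>
    if i = t then G
    else find_G_loop m t rm fuel (PySem.Int.mod (i+1) m) (G + PySem.List.pyGetD rm i 0)

def find_G (tau : Int) (n : Int) (T : Int) (reward_memory : List Int) : Int :=
  find_G_loop (n+1) (PySem.Int.mod T (n+1)) reward_memory (n+1).toNat (PySem.Int.mod (tau+1) (n+1)) 0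

-- ===== PORT B =====
def find_G_alt (tau : Int) (n : Int) (T : Int) (reward_memory : List Int) : Int :=
  let m := n + 1
  let start := PySem.Int.mod (tau + 1) m
  let stop := PySem.Int.mod T m
  if start = stop then 0
  else if start < stop then (PySem.List.slice reward_memory (some start) (some stop)).sum
  else (PySem.List.slice reward_memory (some start) (some m)).sum
       + (PySem.List.slice reward_memory (some 0) (some stop)).sum

-- ===== PRECONDITION & SPEC =====
-- Pre_ admits any n + 1 ≠ 0 when the start and stop residues coincide (neither program indexes the
-- list there); otherwise it restricts to the natural domain n ≥ 0 (n+1 is the circular-buffer size;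
-- for n < 0 A raises ZeroDivisionError/IndexError or returns a value only via Python's
-- negative-index wraparound, an artefact of A's implementation) and, within it, admits exactly the
-- inputs on which every index A visits is in range (on the others A raises IndexError).
def Pre_find_G (tau : Int) (n : Int) (T : Int) (reward_memory : List Int) : Prop :=
  (n + 1 ≠ 0 ∧ PySem.Int.mod (tau + 1) (n + 1) = PySem.Int.mod T (n + 1)) ∨
  (0 ≤ n ∧
   ((PySem.Int.mod (tau + 1) (n + 1) < PySem.Int.mod T (n + 1) ∧
      PySem.Int.mod T (n + 1) ≤ (reward_memory.length : Int)) ∨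
    (PySem.Int.mod T (n + 1) < PySem.Int.mod (tau + 1) (n + 1) ∧
      n + 1 ≤ (reward_memory.length : Int))))
instance (tau : Int) (n : Int) (T : Int) (reward_memory : List Int) : Decidable (Pre_find_G tau n T reward_memory) := by unfold Pre_find_G; infer_instance

def pvWitness_find_G : Int × Int × Int × List Int := (0, 2, 2, [1, 2, 3])

def Spec_find_G (tau : Int) (n : Int) (T : Int) (reward_memory : List Int) (out : Int) : Prop := out = find_G_alt tau n T reward_memory
instance (tau : Int) (n : Int) (T : Int) (reward_memory : List Int) (out : Int) : Decidable (Spec_find_G tau n T reward_memory out) := by unfold Spec_find_G; infer_instance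

-- ===== CLAIM (what is proved, stated in full; the proofs are below) =====
def Claim_equal_find_G : Prop := ∀ (tau : Int) (n : Int) (T : Int) (reward_memory : List Int), Dom_find_G tau n T reward_memory → Pre_find_G tau n T reward_memory → Spec_find_G tau n T reward_memory (find_G tau n T reward_memory)

-- ===== LEMMAS AND PROOFS =====

-- peeling one element off the front of a slice sum
lemma slice_sum_step (rm : List Int) (a b : Int) (ha : 0 ≤ a) (hab : a < b)
    (hlen : a < (rm.length : Int)) :
    (PySem.List.slice rm (some a) (some b)).sum
      = PySem.List.pyGetD rm a 0 + (PySem.List.slice rm (some (a+1)) (some b)).sum := by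
  rw [PySem.List.pyGetD_eq_getElem rm 0 ha (by exact_mod_cast hlen),
      PySem.List.slice_toNat rm ha (by omega), PySem.List.slice_toNat rm (by omega) (by omega)]
  have h1 : a.toNat < rm.length := by omega
  rw [List.drop_eq_getElem_cons h1]
  have h2 : (a+1).toNat = a.toNat + 1 := by omega
  have h3 : b.toNat - a.toNat = (b.toNat - (a+1).toNat) + 1 := by omega
  rw [h3, List.take_succ_cons, List.sum_cons, h2]

lemma slice_sum_self (rm : List Int) (a : Int) (ha : 0 ≤ a) :
    (PySem.List.slice rm (some a) (some a)).sum = 0 := by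
  rw [PySem.List.slice_toNat rm ha ha]
  simp

-- for residues i, t of a positive modulus m, A's loop distance is zero exactly at i = t
lemma mod_zero_iff (m t i : Int) (hm : 0 < m) (hi0 : 0 ≤ i) (him : i < m)
    (ht0 : 0 ≤ t) (htm : t < m) : PySem.Int.mod (t - i) m = 0 ↔ t = i := by
  rw [PySem.Int.mod_eq_zero_iff_dvd]
  constructor
  · rintro ⟨k, hk⟩
    rcases lt_trichotomy k 0 with h | h | h
    · have hmk : m * k ≤ -m := by nlinarith
      omega
    · subst h; simp at hk; omega
    · have hmk : m ≤ m * k := by nlinarith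
      omega
  · intro h; rw [h]; simp

-- A's loop computes the circular-segment sum that B evaluates with slices
lemma loop_eq (m t : Int) (rm : List Int) (hm : 0 < m) (ht0 : 0 ≤ t) (htm : t < m) :
    ∀ (fuel : Nat) (i G : Int), 0 ≤ i → i < m →
      (PySem.Int.mod (t - i) m).toNat ≤ fuel →
      (i ≤ t → t ≤ (rm.length : Int)) → (t < i → m ≤ (rm.length : Int)) →
      find_G_loop m t rm fuel i G
        = G + (if i ≤ t then (PySem.List.slice rm (some i) (some t)).sum
               else (PySem.List.slice rm (some i) (some m)).sum
                    + (PySem.List.slice rm (some 0) (some t)).sum) := by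
  intro fuel
  induction fuel with
  | zero =>
    intro i G hi0 him hd h1 h2
    have hmod0 : PySem.Int.mod (t - i) m = 0 := by
      have := PySem.Int.mod_nonneg (t - i) hm; omega
    have hti : t = i := (mod_zero_iff m t i hm hi0 him ht0 htm).mp hmod0
    subst hti
    simp [find_G_loop, slice_sum_self rm t ht0]
  | succ fuel ih =>
    intro i G hi0 him hd h1 h2
    by_cases hit : i = t
    · subst hit
      simp [find_G_loop, slice_sum_self rm i hi0]
    · rw [show find_G_loop m t rm (fuel+1) i G
          = find_G_loop m t rm fuel (PySem.Int.mod (i+1) m) (G + PySem.List.pyGetD rm i 0) from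
          by simp [find_G_loop, hit]]
      have hr1 : 1 ≤ PySem.Int.mod (t - i) m := by
        have h0 := PySem.Int.mod_nonneg (t - i) hm
        have hne : PySem.Int.mod (t - i) m ≠ 0 := by
          intro h; exact hit ((mod_zero_iff m t i hm hi0 him ht0 htm).mp h).symm
        omega
      -- the loop distance decreases by one at each step
      have hdec : PySem.Int.mod (t - PySem.Int.mod (i+1) m) m = PySem.Int.mod (t - i) m - 1 := by
        rw [PySem.Int.mod_eq_emod_of_pos hm, PySem.Int.mod_eq_emod_of_pos hm,
            PySem.Int.mod_eq_emod_of_pos hm]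
        rw [PySem.Int.mod_eq_emod_of_pos hm] at hr1
        have e1 : t - (i+1) % m = (t - (i+1)) + m * ((i+1) / m) := by
          rw [Int.emod_def]; ring
        rw [e1, Int.add_mul_emod_self_left]
        have e2 : t - (i+1) = ((t - i) % m - 1) + m * ((t - i) / m) := by
          rw [Int.emod_def]; ring
        rw [e2, Int.add_mul_emod_self_left]
        have hlt := Int.emod_lt_of_pos (t - i) hm
        exact Int.emod_eq_of_lt (by omega) (by omega)
      rcases lt_or_gt_of_ne hit with hlt | hgt
      · -- i < t : one more element of rm[i:t]
        have hi' : PySem.Int.mod (i+1) m = i + 1 := by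
          rw [PySem.Int.mod_eq_emod_of_pos hm]
          exact Int.emod_eq_of_lt (by omega) (by omega)
        rw [hi'] at hdec
        rw [hi', ih (i+1) _ (by omega) (by omega) (by omega) (fun _ => h1 (by omega)) (by omega)]
        have hlen : t ≤ (rm.length : Int) := h1 (by omega)
        rw [if_pos (by omega : i ≤ t), if_pos (by omega : i + 1 ≤ t),
            slice_sum_step rm i t hi0 hlt (by omega)]
        ring
      · -- t < i : in the wrapping part rm[i:m]
        have hmlen : m ≤ (rm.length : Int) := h2 hgt
        by_cases hend : i + 1 = m
        · have hi' : PySem.Int.mod (i+1) m = 0 := by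
            rw [hend, PySem.Int.mod_eq_emod_of_pos hm]; simp
          rw [hi'] at hdec
          rw [hi', ih 0 _ (by omega) (by omega) (by omega) (fun _ => by omega) (by omega)]
          rw [if_neg (by omega : ¬ i ≤ t), if_pos ht0,
              slice_sum_step rm i m hi0 (by omega) (by omega)]
          have : (PySem.List.slice rm (some (i+1)) (some m)).sum = 0 := by
            rw [hend]; exact slice_sum_self rm m (by omega)
          rw [this]; ring
        · have hi' : PySem.Int.mod (i+1) m = i + 1 := by
            rw [PySem.Int.mod_eq_emod_of_pos hm]
            exact Int.emod_eq_of_lt (by omega) (by omega)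
          rw [hi'] at hdec
          rw [hi', ih (i+1) _ (by omega) (by omega) (by omega) (by omega) (fun _ => hmlen)]
          rw [if_neg (by omega : ¬ i ≤ t), if_neg (by omega : ¬ i + 1 ≤ t),
              slice_sum_step rm i m hi0 (by omega) (by omega)]
          ring

-- ===== VERDICT (by name: the statement is the Claim_ definition above) =====
theorem find_G_spec : Claim_equal_find_G := by
  intro tau n T rm _hdom hpre
  simp only [Spec_find_G, find_G, find_G_alt]
  set s := PySem.Int.mod (tau + 1) (n + 1) with hs
  set t := PySem.Int.mod T (n + 1) with htdef
  rcases hpre with ⟨_, hst⟩ | ⟨hn, hcase⟩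
  · -- coinciding residues: the loop breaks at once, B returns 0 in its first branch
    rw [← hs, ← htdef] at hst
    cases hk : (n + 1).toNat with
    | zero => simp [find_G_loop, hst]
    | succ k => simp [find_G_loop, hst]
  · have hm : (0:Int) < n + 1 := by omega
    have hs0 := PySem.Int.mod_nonneg (tau + 1) hm
    have hsm := PySem.Int.mod_lt (tau + 1) hm
    have ht0 := PySem.Int.mod_nonneg T hm
    have htm := PySem.Int.mod_lt T hm
    rw [← hs] at hs0 hsm
    rw [← htdef] at ht0 htm
    rcases hcase with ⟨hlt, hlen⟩ | ⟨hgt, hlen⟩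
    · have hst : s ≠ t := by omega
      rw [loop_eq (n + 1) t rm hm ht0 htm _ s 0 hs0 hsm
            (by have := PySem.Int.mod_lt (t - s) hm; have := PySem.Int.mod_nonneg (t - s) hm; omega)
            (fun _ => hlen) (by omega)]
      rw [if_pos (le_of_lt hlt), if_neg hst, if_pos hlt]
      ring
    · have hst : s ≠ t := by omega
      rw [loop_eq (n + 1) t rm hm ht0 htm _ s 0 hs0 hsm
            (by have := PySem.Int.mod_lt (t - s) hm; have := PySem.Int.mod_nonneg (t - s) hm; omega)
            (by omega) (fun _ => hlen)]
      rw [if_neg (by omega : ¬ s ≤ t), if_neg hst, if_neg (by omega : ¬ s < t)]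
      ring
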